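-- pv_equiv track=rewrite | github.com/TechsNtheCity940/OliTunes | backend/model_integration.py | _apply_style_bias
-- ===== SOURCE A (Python) =====
-- from typing import Dict, List, Tuple, Union, Optional
--
-- def _apply_style_bias(positions: List[Dict], style: str) -> List[Dict]:
--     """
--     Apply playing style bias to positions.
--
--     Args:
--         positions: List of possible positions
--         style: Playing style
--
--     Returns:
--         List of positions with style score added
--     """
--     # Define style biases
--     style_biases = {
--         "blues": {"open": 0, "low": 3, "mid": 5, "high": 2},
--         "rock": {"open": 1, "low": 4, "mid": 5, "high": 3},
--         "jazz": {"open": 0, "low": 2, "mid": 4, "high": 5},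
--         "folk": {"open": 5, "low": 4, "mid": 2, "high": 0},
--         "country": {"open": 4, "low": 5, "mid": 3, "high": 1},
--         "metal": {"open": 2, "low": 3, "mid": 5, "high": 4},
--         "classical": {"open": 5, "low": 3, "mid": 2, "high": 1},
--         "fingerstyle": {"open": 5, "low": 4, "mid": 3, "high": 1}
--     }
--
--     # Default to rock if style not found
--     if style.lower() not in style_biases:
--         style = "rock"
--
--     bias = style_biases[style.lower()]
--
--     # Apply bias to each position
--     for pos in positions:
--         fret = pos["fret"]
--
--         # Categorize position
--         if fret == 0:
--             category = "open"
--         elif fret < 5: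
--             category = "low"
--         elif fret < 12:
--             category = "mid"
--         else:
--             category = "high"
--
--         # Add style score
--         pos["style_score"] = bias[category]
--
--     # Sort by style score (highest first)
--     positions.sort(key=lambda p: p.get("style_score", 0), reverse=True)
--
--     return positions
-- ===== SOURCE B (Python) =====
-- # (open, low, mid, high) weight tuples per style; unknown styles fall back to rock.
-- _STYLE_WEIGHTS = {
--     "blues": (0, 3, 5, 2),
--     "rock": (1, 4, 5, 3),
--     "jazz": (0, 2, 4, 5),
--     "folk": (5, 4, 2, 0),
--     "country": (4, 5, 3, 1),
--     "metal": (2, 3, 5, 4),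
--     "classical": (5, 3, 2, 1),
--     "fingerstyle": (5, 4, 3, 1),
-- }
--
--
-- def _apply_style_bias(positions, style):
--     """
--     Score positions by playing style, then order them highest score first
--     with a one-pass bucket sort (every score is in 0..5), in place.
--     """
--     weights = _STYLE_WEIGHTS.get(style.lower(), _STYLE_WEIGHTS["rock"])
--
--     buckets = [[] for _ in range(6)]
--     for pos in positions:
--         fret = pos["fret"]
--         if fret == 0:
--             idx = 0
--         elif fret < 5:
--             idx = 1
--         elif fret < 12:
--             idx = 2
--         else:
--             idx = 3
--         score = weights[idx]
--         pos["style_score"] = score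
--         buckets[score].append(pos)
--
--     out = []
--     for bucket in reversed(buckets):
--         out.extend(bucket)
--     positions[:] = out
--     return positions
-- ===== Notes on version B (the rewrite author's own statement) =====
-- stated objective: alternative
-- what changed: B keeps the weights as flat (open,low,mid,high) tuples instead of nested dicts and replaces A's stable reverse comparison sort by a one-pass bucket sort: each position is appended to the bucket of its score (always 0..5) while being scored, and the buckets are concatenated from 5 down to 0, preserving original order within equal scores.
import Mathlib
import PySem

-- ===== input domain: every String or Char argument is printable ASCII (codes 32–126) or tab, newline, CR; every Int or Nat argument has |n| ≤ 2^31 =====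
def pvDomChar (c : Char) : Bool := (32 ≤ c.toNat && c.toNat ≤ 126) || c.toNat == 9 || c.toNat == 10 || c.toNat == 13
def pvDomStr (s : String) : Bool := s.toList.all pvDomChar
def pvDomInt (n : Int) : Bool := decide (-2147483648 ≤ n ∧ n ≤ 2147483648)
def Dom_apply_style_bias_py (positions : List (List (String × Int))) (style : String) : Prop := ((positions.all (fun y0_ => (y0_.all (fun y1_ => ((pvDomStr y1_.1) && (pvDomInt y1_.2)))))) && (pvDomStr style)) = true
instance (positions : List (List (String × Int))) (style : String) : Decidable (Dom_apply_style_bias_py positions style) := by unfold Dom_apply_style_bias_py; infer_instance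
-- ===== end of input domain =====

-- B keeps the style weights as flat (open,low,mid,high) tuples and replaces A's reverse comparison
-- sort by a one-pass bucket sort over the scores 0..5 (stable, highest first); both versions mutate
-- the positions list in place the same way — the theorems are about the return value.

-- ===== PORT A =====
-- module constant of Source A: the style_biases dict of dicts
def styleBiases : PySem.Dict String (PySem.Dict String Int) :=
  PySem.Dict.ofList [
    ("blues", PySem.Dict.ofList [("open", 0), ("low", 3), ("mid", 5), ("high", 2)]),
    ("rock", PySem.Dict.ofList [("open", 1), ("low", 4), ("mid", 5), ("high", 3)]),
    ("jazz", PySem.Dict.ofList [("open", 0), ("low", 2), ("mid", 4), ("high", 5)]),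
    ("folk", PySem.Dict.ofList [("open", 5), ("low", 4), ("mid", 2), ("high", 0)]),
    ("country", PySem.Dict.ofList [("open", 4), ("low", 5), ("mid", 3), ("high", 1)]),
    ("metal", PySem.Dict.ofList [("open", 2), ("low", 3), ("mid", 5), ("high", 4)]),
    ("classical", PySem.Dict.ofList [("open", 5), ("low", 3), ("mid", 2), ("high", 1)]),
    ("fingerstyle", PySem.Dict.ofList [("open", 5), ("low", 4), ("mid", 3), ("high", 1)])]

def apply_style_bias_py (positions : List (List (String × Int))) (style : String) : List (List (String × Int)) :=
  -- if style.lower() not in style_biases: style = "rock"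
  let style1 := if styleBiases.contains (PySem.Str.lower style) then style else "rock"
  -- bias = style_biases[style.lower()]  (key is present here by construction; the getD default is unreachable)
  let bias := (styleBiases.get? (PySem.Str.lower style1)).getD PySem.Dict.empty
  let scored := positions.map (fun pos =>
    let d := PySem.Dict.ofList pos
    -- fret = pos["fret"] : KeyError when absent — excluded by Pre_; the getD default is unreachable inside Pre_
    let fret := (d.get? "fret").getD 0
    let category := if fret = 0 then "open" else if fret < 5 then "low" else if fret < 12 then "mid" else "high"
    -- pos["style_score"] = bias[category]  (category is always a key of bias; getD default unreachable)
    (d.insert "style_score" ((bias.get? category).getD 0)).items)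
  -- positions.sort(key=lambda p: p.get("style_score", 0), reverse=True)
  PySem.List.sorted scored (fun p => PySem.Dict.getD (PySem.Dict.mk p) "style_score" 0) true

-- ===== PORT B =====
-- module constant of Source B: _STYLE_WEIGHTS, (open, low, mid, high) tuples
def styleWeights : PySem.Dict String (Int × Int × Int × Int) :=
  PySem.Dict.ofList [
    ("blues", (0, 3, 5, 2)), ("rock", (1, 4, 5, 3)), ("jazz", (0, 2, 4, 5)),
    ("folk", (5, 4, 2, 0)), ("country", (4, 5, 3, 1)), ("metal", (2, 3, 5, 4)),
    ("classical", (5, 3, 2, 1)), ("fingerstyle", (5, 4, 3, 1))]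

-- Python tuple indexing weights[idx]; exact for idx in 0..3, which is the only way Source B calls it
def pyTupleGet4 (w : Int × Int × Int × Int) (i : Int) : Int :=
  if i = 0 then w.1 else if i = 1 then w.2.1 else if i = 2 then w.2.2.1 else w.2.2.2

def apply_style_bias_py_alt (positions : List (List (String × Int))) (style : String) : List (List (String × Int)) :=
  -- weights = _STYLE_WEIGHTS.get(style.lower(), _STYLE_WEIGHTS["rock"])  ("rock" is a literal key; getD default unreachable)
  let w := (styleWeights.get? (PySem.Str.lower style)).getD ((styleWeights.get? "rock").getD (0, 0, 0, 0))
  -- buckets = [[] for _ in range(6)]; one pass: score each position and append it to buckets[score]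
  let buckets := positions.foldl (fun (bs : List (List (List (String × Int)))) pos =>
    let d := PySem.Dict.ofList pos
    -- fret = pos["fret"] : KeyError when absent — excluded by Pre_
    let fret := (d.get? "fret").getD 0
    let idx : Int := if fret = 0 then 0 else if fret < 5 then 1 else if fret < 12 then 2 else 3
    let score := pyTupleGet4 w idx
    let p := (d.insert "style_score" score).items
    -- buckets[score].append(pos): score is always in 0..5 here, so .toNat indexing is exact
    bs.set score.toNat ((bs.getD score.toNat []) ++ [p]))
    [[], [], [], [], [], []]
  -- out = []; for bucket in reversed(buckets): out.extend(bucket); positions[:] = out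
  buckets.reverse.foldl (fun out b => out ++ b) []

-- ===== PRECONDITION & SPEC =====
-- Pre_ excludes exactly the positions without a "fret" key, on which Python A (and B) raise KeyError.
def Pre_apply_style_bias_py (positions : List (List (String × Int))) (_style : String) : Prop :=
  ∀ pos ∈ positions, (PySem.Dict.ofList pos).contains "fret" = true
instance (positions : List (List (String × Int))) (style : String) : Decidable (Pre_apply_style_bias_py positions style) := by unfold Pre_apply_style_bias_py; infer_instance

def pvWitness_apply_style_bias_py : (List (List (String × Int))) × String :=
  ([[("fret", 0)], [("fret", 7)], [("fret", 15)]], "Jazz")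

def Spec_apply_style_bias_py (positions : List (List (String × Int))) (style : String) (out : List (List (String × Int))) : Prop := out = apply_style_bias_py_alt positions style
instance (positions : List (List (String × Int))) (style : String) (out : List (List (String × Int))) : Decidable (Spec_apply_style_bias_py positions style out) := by unfold Spec_apply_style_bias_py; infer_instance

-- ===== CLAIM (what is proved, stated in full; the proofs are below) =====
def Claim_equal_apply_style_bias_py : Prop := ∀ (positions : List (List (String × Int))) (style : String), Dom_apply_style_bias_py positions style → Pre_apply_style_bias_py positions style → Spec_apply_style_bias_py positions style (apply_style_bias_py positions style)

-- ===== LEMMAS AND PROOFS =====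

-- B's weight tuples are exactly A's bias dicts flattened in (open, low, mid, high) order.
def dictToTuple (d : PySem.Dict String Int) : Int × Int × Int × Int :=
  ((d.get? "open").getD 0, (d.get? "low").getD 0, (d.get? "mid").getD 0, (d.get? "high").getD 0)

theorem weights_corr (k : String) :
    styleWeights.get? k = (styleBiases.get? k).map dictToTuple := by
  rw [show styleWeights = PySem.Dict.mk [
    ("blues", (0, 3, 5, 2)), ("rock", (1, 4, 5, 3)), ("jazz", (0, 2, 4, 5)),
    ("folk", (5, 4, 2, 0)), ("country", (4, 5, 3, 1)), ("metal", (2, 3, 5, 4)),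
    ("classical", (5, 3, 2, 1)), ("fingerstyle", (5, 4, 3, 1))] from by decide]
  rw [show styleBiases = PySem.Dict.mk [
    ("blues", PySem.Dict.mk [("open", 0), ("low", 3), ("mid", 5), ("high", 2)]),
    ("rock", PySem.Dict.mk [("open", 1), ("low", 4), ("mid", 5), ("high", 3)]),
    ("jazz", PySem.Dict.mk [("open", 0), ("low", 2), ("mid", 4), ("high", 5)]),
    ("folk", PySem.Dict.mk [("open", 5), ("low", 4), ("mid", 2), ("high", 0)]),
    ("country", PySem.Dict.mk [("open", 4), ("low", 5), ("mid", 3), ("high", 1)]),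
    ("metal", PySem.Dict.mk [("open", 2), ("low", 3), ("mid", 5), ("high", 4)]),
    ("classical", PySem.Dict.mk [("open", 5), ("low", 3), ("mid", 2), ("high", 1)]),
    ("fingerstyle", PySem.Dict.mk [("open", 5), ("low", 4), ("mid", 3), ("high", 1)])] from by decide]
  simp only [PySem.Dict.get?_mk_cons]
  split_ifs <;> rfl

-- A's "reassign style, then index" bias lookup equals the dict.get-with-default form.
theorem bias_eq (style : String) :
    (styleBiases.get? (PySem.Str.lower (if styleBiases.contains (PySem.Str.lower style) then style else "rock"))).getD PySem.Dict.empty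
      = (styleBiases.get? (PySem.Str.lower style)).getD ((styleBiases.get? "rock").getD PySem.Dict.empty) := by
  by_cases h : styleBiases.contains (PySem.Str.lower style) = true
  · rw [if_pos h]
    rcases ho : styleBiases.get? (PySem.Str.lower style) with _ | b
    · rw [PySem.Dict.get?_eq_none_iff_contains] at ho
      simp [h] at ho
    · simp
  · rw [if_neg h]
    have ho : styleBiases.get? (PySem.Str.lower style) = none := by
      rw [PySem.Dict.get?_eq_none_iff_contains]
      simpa using h
    rw [ho]
    rfl

-- B's weight tuple is the flattening of A's (normalized) bias dict.
theorem w_eq_dictToTuple (style : String) :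
    (styleWeights.get? (PySem.Str.lower style)).getD ((styleWeights.get? "rock").getD (0, 0, 0, 0))
      = dictToTuple ((styleBiases.get? (PySem.Str.lower style)).getD ((styleBiases.get? "rock").getD PySem.Dict.empty)) := by
  rw [weights_corr]
  rcases h : styleBiases.get? (PySem.Str.lower style) with _ | d
  · simp only [Option.map_none, Option.getD_none]
    decide
  · simp

-- B's tuple indexing through the idx chain is A's dict lookup through the category chain.
theorem chain_eq (d : PySem.Dict String Int) (fret : Int) :
    pyTupleGet4 (dictToTuple d) (if fret = 0 then 0 else if fret < 5 then 1 else if fret < 12 then 2 else 3)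
      = (d.get? (if fret = 0 then "open" else if fret < 5 then "low" else if fret < 12 then "mid" else "high")).getD 0 := by
  unfold pyTupleGet4 dictToTuple
  split_ifs <;> first | rfl | omega

-- every value the bias lookup can produce lies in 5..0
theorem score_mem (style : String) (cat : String)
    (hc : cat ∈ (["open", "low", "mid", "high"] : List String)) :
    ((((styleBiases.get? (PySem.Str.lower style)).getD ((styleBiases.get? "rock").getD PySem.Dict.empty)).get? cat).getD 0)
      ∈ ([5, 4, 3, 2, 1, 0] : List Int) := by
  rcases ho : styleBiases.get? (PySem.Str.lower style) with _ | b
  · fin_cases hc <;> decide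
  · simp only [Option.getD_some]
    have ho' : Option.map (fun x => x.2) (List.find? (fun p => p.1 == PySem.Str.lower style) styleBiases.items) = some b := ho
    rcases Option.map_eq_some_iff.mp ho' with ⟨pr, hfind, hpr⟩
    have hmem := List.mem_of_find?_eq_some hfind
    have hi : styleBiases.items = [
      ("blues", PySem.Dict.mk [("open", 0), ("low", 3), ("mid", 5), ("high", 2)]),
      ("rock", PySem.Dict.mk [("open", 1), ("low", 4), ("mid", 5), ("high", 3)]),
      ("jazz", PySem.Dict.mk [("open", 0), ("low", 2), ("mid", 4), ("high", 5)]),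
      ("folk", PySem.Dict.mk [("open", 5), ("low", 4), ("mid", 2), ("high", 0)]),
      ("country", PySem.Dict.mk [("open", 4), ("low", 5), ("mid", 3), ("high", 1)]),
      ("metal", PySem.Dict.mk [("open", 2), ("low", 3), ("mid", 5), ("high", 4)]),
      ("classical", PySem.Dict.mk [("open", 5), ("low", 3), ("mid", 2), ("high", 1)]),
      ("fingerstyle", PySem.Dict.mk [("open", 5), ("low", 4), ("mid", 3), ("high", 1)])] := by decide
    rw [hi] at hmem
    subst hpr
    simp only [List.mem_cons, List.not_mem_nil, or_false] at hmem
    rcases hmem with h | h | h | h | h | h | h | h <;> subst h <;> fin_cases hc <;> decide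

-- insertBy appends x after a block it does not go before
theorem insertBy_append_not {α : Type} (before : α → α → Bool) (x : α) (l1 l2 : List α)
    (h : ∀ y ∈ l1, before x y = false) :
    PySem.List.insertBy before x (l1 ++ l2) = l1 ++ PySem.List.insertBy before x l2 := by
  induction l1 with
  | nil => rfl
  | cons y ys ih =>
    simp only [List.cons_append, PySem.List.insertBy, h y (by simp)]
    simp only [Bool.false_eq_true, if_false, List.cons.injEq, true_and]
    exact ih (fun z hz => h z (by simp [hz]))

-- insertBy puts x in front of a block it goes before everywhere
theorem insertBy_all_true {α : Type} (before : α → α → Bool) (x : α) (l : List α)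
    (h : ∀ y ∈ l, before x y = true) :
    PySem.List.insertBy before x l = x :: l := by
  cases l with
  | nil => rfl
  | cons y ys => simp [PySem.List.insertBy, h y (by simp)]

-- one insertion into a bucket concatenation lands at the end of x's bucket
theorem insertBy_flatMap_filter {α : Type} (f : α → Int) (x : α) :
    ∀ (vs : List Int), vs.Pairwise (· > ·) → f x ∈ vs → ∀ (p : List α),
    PySem.List.insertBy (fun a b => decide (f b < f a)) x
        (vs.flatMap (fun v => p.filter (fun y => f y == v)))
      = vs.flatMap (fun v => (p ++ [x]).filter (fun y => f y == v)) := by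
  intro vs
  induction vs with
  | nil => intro _ hx; simp at hx
  | cons v vs ih =>
    intro hpw hx p
    have hv : ∀ w ∈ vs, v > w := fun w hw => List.rel_of_pairwise_cons hpw hw
    have hpw' : vs.Pairwise (· > ·) := hpw.of_cons
    by_cases hfx : f x = v
    · simp only [List.flatMap_cons]
      rw [insertBy_append_not _ x _ _ (by
        intro y hy
        have : f y = v := by simpa using (List.mem_filter.mp hy).2
        simp [this, hfx])]
      rw [insertBy_all_true _ x _ (by
        intro y hy
        rcases List.mem_flatMap.mp hy with ⟨w, hw, hyw⟩
        have h1 : f y = w := by simpa using (List.mem_filter.mp hyw).2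
        have : f y < f x := by rw [h1, hfx]; exact hv w hw
        simpa using this)]
      have hfirst : (p ++ [x]).filter (fun y => f y == v) = p.filter (fun y => f y == v) ++ [x] := by
        simp [List.filter_append, hfx]
      have hrest : vs.flatMap (fun w => (p ++ [x]).filter (fun y => f y == w))
          = vs.flatMap (fun w => p.filter (fun y => f y == w)) := by
        apply List.flatMap_congr
        intro w hw
        have hne : f x ≠ w := by rw [hfx]; exact ne_of_gt (hv w hw)
        simp [List.filter_append, hne]
      rw [hfirst, hrest]
      simp
    · have hx' : f x ∈ vs := by simpa [hfx] using hx
      simp only [List.flatMap_cons]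
      rw [insertBy_append_not _ x _ _ (by
        intro y hy
        have h1 : f y = v := by simpa using (List.mem_filter.mp hy).2
        have : ¬ f y < f x := by rw [h1]; exact not_lt.mpr (le_of_lt (hv _ hx'))
        simpa using this)]
      rw [ih hpw' hx' p]
      have hfirst : (p ++ [x]).filter (fun y => f y == v) = p.filter (fun y => f y == v) := by
        simp [List.filter_append, hfx]
      rw [hfirst]

-- folding insertBy over xs from a bucket concatenation of p yields the buckets of p ++ xs
theorem foldl_insertBy_buckets {α : Type} (f : α → Int) (vs : List Int) (hpw : vs.Pairwise (· > ·)) :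
    ∀ (xs p : List α), (∀ x ∈ xs, f x ∈ vs) →
    xs.foldl (fun acc x => PySem.List.insertBy (fun a b => decide (f b < f a)) x acc)
        (vs.flatMap (fun v => p.filter (fun y => f y == v)))
      = vs.flatMap (fun v => (p ++ xs).filter (fun y => f y == v)) := by
  intro xs
  induction xs with
  | nil => intro p _; simp
  | cons x xs ih =>
    intro p h
    simp only [List.foldl_cons]
    rw [insertBy_flatMap_filter f x vs hpw (h x (by simp)) p,
        ih (p ++ [x]) (fun z hz => h z (by simp [hz]))]
    simp

-- the stable reverse sort by a key with values in a strictly decreasing vs IS the bucket concatenation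
theorem sorted_rev_eq_buckets {α : Type} (f : α → Int) (vs : List Int) (hpw : vs.Pairwise (· > ·))
    (xs : List α) (h : ∀ x ∈ xs, f x ∈ vs) :
    PySem.List.sorted xs f true = vs.flatMap (fun v => xs.filter (fun y => f y == v)) := by
  rw [PySem.List.sorted_rev_eq_foldl_insertBy]
  have h0 : (vs.flatMap (fun v => ([] : List α).filter (fun y => f y == v))) = [] := by simp
  calc xs.foldl (fun acc x => PySem.List.insertBy (fun a b => decide (f b < f a)) x acc) []
      = xs.foldl (fun acc x => PySem.List.insertBy (fun a b => decide (f b < f a)) x acc)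
          (vs.flatMap (fun v => ([] : List α).filter (fun y => f y == v))) := by rw [h0]
    _ = vs.flatMap (fun v => (([] : List α) ++ xs).filter (fun y => f y == v)) :=
        foldl_insertBy_buckets f vs hpw xs [] h
    _ = vs.flatMap (fun v => xs.filter (fun y => f y == v)) := by simp

-- B's one-pass bucket fold computes, bucket by bucket, the score-filters of the input
theorem fold_buckets6 {α β : Type} (g : α → Int) (item : α → β) :
    ∀ (xs : List α) (b0 b1 b2 b3 b4 b5 : List β),
    (∀ x ∈ xs, g x ∈ ([5, 4, 3, 2, 1, 0] : List Int)) →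
    xs.foldl (fun bs x => bs.set (g x).toNat ((bs.getD (g x).toNat []) ++ [item x])) [b0, b1, b2, b3, b4, b5]
      = [b0 ++ (xs.filter (fun x => g x == 0)).map item,
         b1 ++ (xs.filter (fun x => g x == 1)).map item,
         b2 ++ (xs.filter (fun x => g x == 2)).map item,
         b3 ++ (xs.filter (fun x => g x == 3)).map item,
         b4 ++ (xs.filter (fun x => g x == 4)).map item,
         b5 ++ (xs.filter (fun x => g x == 5)).map item] := by
  intro xs
  induction xs with
  | nil => intro b0 b1 b2 b3 b4 b5 _; simp
  | cons x xs ih =>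
    intro b0 b1 b2 b3 b4 b5 h
    have hrest : ∀ y ∈ xs, g y ∈ ([5, 4, 3, 2, 1, 0] : List Int) := fun y hy => h y (by simp [hy])
    have hx : g x = 5 ∨ g x = 4 ∨ g x = 3 ∨ g x = 2 ∨ g x = 1 ∨ g x = 0 := by
      simpa using h x (by simp)
    simp only [List.foldl_cons]
    rcases hx with h | h | h | h | h | h <;> rw [h]
    · exact (ih b0 b1 b2 b3 b4 (b5 ++ [item x]) hrest).trans (by simp [h, List.append_assoc])
    · exact (ih b0 b1 b2 b3 (b4 ++ [item x]) b5 hrest).trans (by simp [h, List.append_assoc])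
    · exact (ih b0 b1 b2 (b3 ++ [item x]) b4 b5 hrest).trans (by simp [h, List.append_assoc])
    · exact (ih b0 b1 (b2 ++ [item x]) b3 b4 b5 hrest).trans (by simp [h, List.append_assoc])
    · exact (ih b0 (b1 ++ [item x]) b2 b3 b4 b5 hrest).trans (by simp [h, List.append_assoc])
    · exact (ih (b0 ++ [item x]) b1 b2 b3 b4 b5 hrest).trans (by simp [h, List.append_assoc])

-- ===== VERDICT (by name: the statement is the Claim_ definition above) =====
theorem apply_style_bias_py_spec : Claim_equal_apply_style_bias_py := by
  intro positions style _ _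
  unfold Spec_apply_style_bias_py apply_style_bias_py apply_style_bias_py_alt
  simp only [bias_eq style, w_eq_dictToTuple style, chain_eq]
  have hb := fold_buckets6
    (fun pos => (((styleBiases.get? (PySem.Str.lower style)).getD ((styleBiases.get? "rock").getD PySem.Dict.empty)).get?
      (if ((PySem.Dict.ofList pos).get? "fret").getD 0 = 0 then "open"
       else if ((PySem.Dict.ofList pos).get? "fret").getD 0 < 5 then "low"
       else if ((PySem.Dict.ofList pos).get? "fret").getD 0 < 12 then "mid" else "high")).getD 0)
    (fun pos => ((PySem.Dict.ofList pos).insert "style_score"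
      ((((styleBiases.get? (PySem.Str.lower style)).getD ((styleBiases.get? "rock").getD PySem.Dict.empty)).get?
      (if ((PySem.Dict.ofList pos).get? "fret").getD 0 = 0 then "open"
       else if ((PySem.Dict.ofList pos).get? "fret").getD 0 < 5 then "low"
       else if ((PySem.Dict.ofList pos).get? "fret").getD 0 < 12 then "mid" else "high")).getD 0)).items)
    positions [] [] [] [] [] []
    (fun pos _ => score_mem style _ (by split_ifs <;> simp))
  rw [hb]  -- bucket fold = per-score filters
  have hkey : ∀ q ∈ positions.map (fun pos => ((PySem.Dict.ofList pos).insert "style_score"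
      ((((styleBiases.get? (PySem.Str.lower style)).getD ((styleBiases.get? "rock").getD PySem.Dict.empty)).get?
      (if ((PySem.Dict.ofList pos).get? "fret").getD 0 = 0 then "open"
       else if ((PySem.Dict.ofList pos).get? "fret").getD 0 < 5 then "low"
       else if ((PySem.Dict.ofList pos).get? "fret").getD 0 < 12 then "mid" else "high")).getD 0)).items),
      PySem.Dict.getD (PySem.Dict.mk q) "style_score" 0 ∈ ([5, 4, 3, 2, 1, 0] : List Int) := by
    intro q hq
    rcases List.mem_map.mp hq with ⟨pos, _, rfl⟩
    show ((PySem.Dict.ofList pos).insert "style_score" _).getD "style_score" 0 ∈ _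
    rw [PySem.Dict.getD_insert_self]
    exact score_mem style _ (by split_ifs <;> simp)
  rw [sorted_rev_eq_buckets _ ([5, 4, 3, 2, 1, 0] : List Int) (by decide) _ hkey]
  have hfil : ∀ v : Int,
      (positions.map (fun pos => ((PySem.Dict.ofList pos).insert "style_score"
      ((((styleBiases.get? (PySem.Str.lower style)).getD ((styleBiases.get? "rock").getD PySem.Dict.empty)).get?
      (if ((PySem.Dict.ofList pos).get? "fret").getD 0 = 0 then "open"
       else if ((PySem.Dict.ofList pos).get? "fret").getD 0 < 5 then "low"
       else if ((PySem.Dict.ofList pos).get? "fret").getD 0 < 12 then "mid" else "high")).getD 0)).items)).filter (fun p => PySem.Dict.getD (PySem.Dict.mk p) "style_score" 0 == v)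
        = (positions.filter (fun pos => ((((styleBiases.get? (PySem.Str.lower style)).getD ((styleBiases.get? "rock").getD PySem.Dict.empty)).get?
      (if ((PySem.Dict.ofList pos).get? "fret").getD 0 = 0 then "open"
       else if ((PySem.Dict.ofList pos).get? "fret").getD 0 < 5 then "low"
       else if ((PySem.Dict.ofList pos).get? "fret").getD 0 < 12 then "mid" else "high")).getD 0) == v)).map (fun pos => ((PySem.Dict.ofList pos).insert "style_score"
      ((((styleBiases.get? (PySem.Str.lower style)).getD ((styleBiases.get? "rock").getD PySem.Dict.empty)).get?
      (if ((PySem.Dict.ofList pos).get? "fret").getD 0 = 0 then "open"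
       else if ((PySem.Dict.ofList pos).get? "fret").getD 0 < 5 then "low"
       else if ((PySem.Dict.ofList pos).get? "fret").getD 0 < 12 then "mid" else "high")).getD 0)).items) := by
    intro v
    rw [List.filter_map]
    congr 1
    apply List.filter_congr
    intro pos _
    show (PySem.Dict.getD (PySem.Dict.mk ((PySem.Dict.ofList pos).insert "style_score" _).items) "style_score" 0 == v) = _
    rw [show ∀ d : PySem.Dict String Int, PySem.Dict.mk d.items = d from fun _ => rfl]
    rw [PySem.Dict.getD_insert_self]
  simp only [hfil]
  simp only [List.flatMap_cons, List.flatMap_nil, List.reverse_cons, List.reverse_nil,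
    List.nil_append, List.append_nil, List.cons_append, List.foldl_cons, List.foldl_nil,
    List.append_assoc]
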